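-- pv_equiv track=rewrite | github.com/Nickanda/CompAssignmentsF22 | Python/rm_smallest.py | rm_smallest
-- ===== SOURCE A (Python) =====
-- def rm_smallest(d):
--     # Your code here!
--     if d:
--         minimum = min(d.values())
--         for key in d:
--             if d[key] == minimum:
--                 del d[key]
--                 break
--     return d
-- ===== SOURCE B (Python) =====
-- def rm_smallest(d):
--     if d:
--         # stable sort: the head of items sorted by value is the first minimal entry
--         target = sorted(d.items(), key=lambda kv: kv[1])[0][0]
--         del d[target]
--     return d
-- ===== Notes on version B (the rewrite author's own statement) =====
-- stated objective: alternative
-- what changed: Replaces the linear min-of-values-then-scan-and-delete with sort-based selection: stably sort the items by value, take the head's key and delete it; stability makes the head the first minimal entry, matching A's first-match deletion.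
import Mathlib
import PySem

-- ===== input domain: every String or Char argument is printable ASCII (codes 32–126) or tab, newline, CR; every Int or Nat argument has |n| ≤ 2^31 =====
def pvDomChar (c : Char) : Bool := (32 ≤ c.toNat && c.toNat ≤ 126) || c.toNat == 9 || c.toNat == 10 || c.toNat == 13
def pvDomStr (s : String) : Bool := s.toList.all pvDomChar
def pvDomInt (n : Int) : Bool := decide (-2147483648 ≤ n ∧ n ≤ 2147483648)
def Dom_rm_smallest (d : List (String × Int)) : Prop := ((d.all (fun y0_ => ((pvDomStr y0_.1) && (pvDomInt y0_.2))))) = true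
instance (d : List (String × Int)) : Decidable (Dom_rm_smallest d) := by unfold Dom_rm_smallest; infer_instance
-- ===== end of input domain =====

-- B replaces A's "min of the values, then scan the keys and delete the first match" by sort-based
-- selection: stably sort the items by value and delete the head's key (an alternative algorithm,
-- O(n log n) instead of O(n)). Both Pythons mutate their argument in place (del); the equivalence
-- proved here is about the return value.

-- ===== PORT A =====
-- d[key] : first-match association-list lookup (exact for a dict, whose keys are unique)
def pvGet? : List (String × Int) → String → Option Int
  | [], _ => none
  | (k, v) :: t, x => if k = x then some v else pvGet? t x

-- del d[key] : remove the entry with that key (exact for a dict, whose keys are unique)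
def pvDel : List (String × Int) → String → List (String × Int)
  | [], _ => []
  | (k, v) :: t, x => if k = x then t else (k, v) :: pvDel t x

-- "for key in d: if d[key] == minimum: del d[key]; break"
def rmLoop (orig : List (String × Int)) (m : Int) : List String → List (String × Int)
  | [] => orig
  | k :: ks => if pvGet? orig k = some m then pvDel orig k else rmLoop orig m ks

def rm_smallest (d : List (String × Int)) : List (String × Int) :=
  if d = [] then d
  else
    match PySem.List.min? (d.map Prod.snd) (fun v => v) with
    | none => d                     -- unreachable: d is non-empty
    | some m => rmLoop d m (d.map Prod.fst)

-- ===== PORT B =====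
-- target = sorted(d.items(), key=lambda kv: kv[1])[0][0]; del d[target]
def rm_smallest_alt (d : List (String × Int)) : List (String × Int) :=
  if d = [] then d
  else
    match PySem.List.sorted d (fun kv => kv.2) with
    | [] => d                       -- unreachable: d is non-empty
    | m :: _ => pvDel d m.1

-- ===== PRECONDITION & SPEC =====
-- Pre_ excludes association lists with duplicate keys: they do not represent any Python dict
-- (dict keys are unique), so A never receives them.
def Pre_rm_smallest (d : List (String × Int)) : Prop := (d.map Prod.fst).Nodup
instance (d : List (String × Int)) : Decidable (Pre_rm_smallest d) := by
  unfold Pre_rm_smallest; infer_instance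

def pvWitness_rm_smallest : (List (String × Int)) := [("a", 2), ("b", 1), ("c", 1)]

def Spec_rm_smallest (d : List (String × Int)) (out : List (String × Int)) : Prop := out = rm_smallest_alt d
instance (d : List (String × Int)) (out : List (String × Int)) : Decidable (Spec_rm_smallest d out) := by unfold Spec_rm_smallest; infer_instance

-- ===== CLAIM (what is proved, stated in full; the proofs are below) =====
def Claim_equal_rm_smallest : Prop := ∀ (d : List (String × Int)), Dom_rm_smallest d → Pre_rm_smallest d → Spec_rm_smallest d (rm_smallest d)

-- ===== LEMMAS AND PROOFS =====

-- lookup of a member under unique keys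
theorem pvGet?_mem : ∀ (d : List (String × Int)), (d.map Prod.fst).Nodup →
    ∀ p ∈ d, pvGet? d p.1 = some p.2 := by
  intro d
  induction d with
  | nil => intro _ p hp; cases hp
  | cons x t ih =>
    intro hnd p hp
    obtain ⟨x1, x2⟩ := x
    simp only [List.map_cons, List.nodup_cons] at hnd
    rcases List.mem_cons.mp hp with h | h
    · subst h; simp [pvGet?]
    · have hne : x1 ≠ p.1 := by
        intro he
        exact hnd.1 (he ▸ List.mem_map.mpr ⟨p, h, rfl⟩)
      simp only [pvGet?, if_neg hne]
      exact ih hnd.2 p h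

theorem pvDel_append : ∀ (pre suf : List (String × Int)) (k : String) (v : Int),
    k ∉ pre.map Prod.fst → pvDel (pre ++ (k, v) :: suf) k = pre ++ suf := by
  intro pre
  induction pre with
  | nil => intro suf k v _; simp [pvDel]
  | cons x t ih =>
    intro suf k v hk
    obtain ⟨x1, x2⟩ := x
    simp only [List.map_cons, List.mem_cons, not_or] at hk
    simp only [List.cons_append, pvDel, if_neg (Ne.symm hk.1)]
    rw [ih suf k v hk.2]

theorem rmLoop_skip : ∀ (ks1 ks2 : List String) (orig : List (String × Int)) (m : Int),
    (∀ k ∈ ks1, pvGet? orig k ≠ some m) → rmLoop orig m (ks1 ++ ks2) = rmLoop orig m ks2 := by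
  intro ks1
  induction ks1 with
  | nil => intro ks2 orig m _; rfl
  | cons k t ih =>
    intro ks2 orig m h
    simp only [List.cons_append, rmLoop, if_neg (h k (List.mem_cons_self))]
    exact ih ks2 orig m (fun x hx => h x (List.mem_cons_of_mem _ hx))

-- the head of the stable insertion-sort fold is the FIRST element of minimal key
theorem foldl_insertBy_head {α : Type} (key : α → Int) :
    ∀ (ps : List α), ps ≠ [] →
      ∃ m t, ps.foldl (fun acc x => PySem.List.insertBy (fun a b => decide (key a < key b)) x acc) [] = m :: t ∧
        (∀ y ∈ ps, key m ≤ key y) ∧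
        ∃ pre suf, ps = pre ++ m :: suf ∧ ∀ y ∈ pre, key m < key y := by
  intro ps
  induction ps using List.reverseRecOn with
  | nil => intro h; exact absurd rfl h
  | append_singleton ps x ih =>
    intro _
    by_cases hps : ps = []
    · subst hps
      exact ⟨x, [], rfl, by simp, [], [], rfl, by simp⟩
    · obtain ⟨m, t, hfold, hmin, pre, suf, hsplit, hpre⟩ := ih hps
      rw [List.foldl_append, hfold]
      simp only [List.foldl_cons, List.foldl_nil]
      by_cases hlt : key x < key m
      · refine ⟨x, m :: t, by simp [PySem.List.insertBy, hlt], ?_, ps, [], by simp, ?_⟩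
        · intro y hy
          rcases List.mem_append.mp hy with h | h
          · exact le_of_lt (lt_of_lt_of_le hlt (hmin y h))
          · simp at h; simp [h]
        · intro y hy; exact lt_of_lt_of_le hlt (hmin y hy)
      · refine ⟨m, PySem.List.insertBy (fun a b => decide (key a < key b)) x t,
          by simp [PySem.List.insertBy, hlt], ?_, pre, suf ++ [x], by simp [hsplit], hpre⟩
        intro y hy
        rcases List.mem_append.mp hy with h | h
        · exact hmin y h
        · simp at h; subst h; exact not_lt.mp hlt

-- the head of PySem.List.sorted by value is the first minimal entry
theorem sorted_head_first (d : List (String × Int)) (m : String × Int) (t : List (String × Int))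
    (h : PySem.List.sorted d (fun kv => kv.2) = m :: t) :
    (∀ y ∈ d, m.2 ≤ y.2) ∧ ∃ pre suf, d = pre ++ m :: suf ∧ ∀ y ∈ pre, m.2 < y.2 := by
  have hne : d ≠ [] := by
    intro he; subst he; simp [PySem.List.sorted] at h
  obtain ⟨m', t', hfold, hmin, pre, suf, hsplit, hpre⟩ := foldl_insertBy_head (fun kv : String × Int => kv.2) d hne
  rw [PySem.List.sorted_eq_foldl_insertBy] at h
  rw [hfold] at h
  obtain ⟨hm, _⟩ := List.cons.inj h
  subst hm
  exact ⟨hmin, pre, suf, hsplit, hpre⟩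

theorem min?_values_some (vs : List Int) (hne : vs ≠ []) :
    ∃ v, PySem.List.min? vs (fun v => v) = some v := by
  cases h : PySem.List.min? vs (fun v => v) with
  | none => exact absurd ((PySem.List.min?_eq_none_iff vs (fun v => v)).mp h) hne
  | some v => exact ⟨v, rfl⟩

-- ===== VERDICT (by name: the statement is the Claim_ definition above) =====
theorem rm_smallest_spec : Claim_equal_rm_smallest := by
  intro d _ hnd
  unfold Spec_rm_smallest
  by_cases hne : d = []
  · subst hne; rfl
  · obtain ⟨m, t, hsortd⟩ : ∃ m t, PySem.List.sorted d (fun kv : String × Int => kv.2) = m :: t := by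
      cases h : PySem.List.sorted d (fun kv : String × Int => kv.2) with
      | nil => exact absurd ((PySem.List.sorted_eq_nil_iff _ _ _).mp h) hne
      | cons m t => exact ⟨m, t, rfl⟩
    obtain ⟨hmin, pre, suf, hsplit, hpre⟩ := sorted_head_first d m t hsortd
    have hget : ∀ p ∈ d, pvGet? d p.1 = some p.2 := pvGet?_mem d hnd
    have hmmem : m ∈ d := by rw [hsplit]; exact List.mem_append_right _ (List.mem_cons_self)
    -- A's minimum value is m.2
    have hv : PySem.List.min? (d.map Prod.snd) (fun v => v) = some m.2 := by
      obtain ⟨v, hv⟩ := min?_values_some (d.map Prod.snd) (by simpa using hne)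
      have hvmem : v ∈ d.map Prod.snd := PySem.List.min?_mem hv
      obtain ⟨p, hp, hpv⟩ := List.mem_map.mp hvmem
      have h1 : v ≤ m.2 := PySem.List.min?_isMin hv m.2 (List.mem_map.mpr ⟨m, hmmem, rfl⟩)
      have h2 : m.2 ≤ v := hpv ▸ hmin p hp
      rw [hv, le_antisymm h1 h2]
    have hk0pre : m.1 ∉ pre.map Prod.fst := by
      intro hmem
      have hthis : ((pre ++ m :: suf).map Prod.fst).Nodup := hsplit ▸ hnd
      simp only [List.map_append, List.map_cons] at hthis
      have h2 := (List.nodup_append.mp hthis).2.2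
      exact h2 _ hmem _ (List.mem_cons_self) rfl
    have hdel : pvDel d m.1 = pre ++ suf := by
      rw [hsplit]
      have : (m.1, m.2) = m := rfl
      rw [← this]
      exact pvDel_append pre suf m.1 m.2 hk0pre
    have hskip : ∀ k ∈ pre.map Prod.fst, pvGet? d k ≠ some m.2 := by
      intro k hkmem
      obtain ⟨y, hy, rfl⟩ := List.mem_map.mp hkmem
      have hymem : y ∈ d := by rw [hsplit]; exact List.mem_append_left _ hy
      rw [hget y hymem]
      intro hc
      exact ne_of_gt (hpre y hy) (Option.some.inj hc)
    have hA : rm_smallest d = pre ++ suf := by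
      unfold rm_smallest
      rw [if_neg hne, hv]
      show rmLoop d m.2 (d.map Prod.fst) = pre ++ suf
      have hmapfst : d.map Prod.fst = pre.map Prod.fst ++ m.1 :: suf.map Prod.fst := by
        rw [hsplit]; simp
      rw [hmapfst, rmLoop_skip _ _ _ _ hskip,
        show rmLoop d m.2 (m.1 :: suf.map Prod.fst) = pvDel d m.1 from by
          simp [rmLoop, hget m hmmem],
        hdel]
    have hB : rm_smallest_alt d = pre ++ suf := by
      unfold rm_smallest_alt
      rw [if_neg hne, hsortd]
      exact hdel
    rw [hA, hB]
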